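-- pv_equiv track=rewrite | github.com/danadajian/Draft-Simulator-Web | backend/src/main/Optimizer.py | get_player_pools
-- ===== SOURCE A (Python) =====
-- def remove_ignored_players(player_pools, black_list):
--     for pool in player_pools:
--         for player in black_list:
--             if player in pool:
--                 pool.remove(player)
--     return player_pools
--
-- def get_player_pools(lineup_matrix, black_list, proj_dict, pos_dict, salary_dict):
--     sorted_players = sorted(proj_dict, key=proj_dict.__getitem__, reverse=True)
--     sorted_positions = [pos_dict.get(player) for player in sorted_players]
--     sorted_positions_dict = dict(zip(sorted_players, sorted_positions))
--     player_pools_with_ignored = [[player for player in sorted_positions_dict.keys()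
--                                   if (sorted_positions_dict.get(player) in spot
--                                   or spot in sorted_positions_dict.get(player))
--                                   and player in salary_dict.keys()]
--                                  for spot in lineup_matrix]
--     player_pools = remove_ignored_players(player_pools_with_ignored, black_list)
--     return player_pools
-- ===== SOURCE B (Python) =====
-- def get_player_pools(lineup_matrix, black_list, proj_dict, pos_dict, salary_dict):
--     pools = [[] for _ in lineup_matrix]
--     banned = set(black_list)
--     for player in sorted(proj_dict, key=proj_dict.__getitem__, reverse=True):
--         pos = pos_dict.get(player)
--         ok = player in salary_dict and player not in banned
--         for spot, pool in zip(lineup_matrix, pools):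
--             if (pos in spot or spot in pos) and ok:
--                 pool.append(player)
--     return pools
-- ===== Notes on version B (the rewrite author's own statement) =====
-- stated objective: alternative
-- what changed: B builds all slot pools in one distributing pass over the projection-sorted players (appending each player to every matching pool, skipping salary-missing and blacklisted players up front via a set) instead of A's per-slot rescan of all players followed by a mutating blacklist-removal pass.
import Mathlib
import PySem

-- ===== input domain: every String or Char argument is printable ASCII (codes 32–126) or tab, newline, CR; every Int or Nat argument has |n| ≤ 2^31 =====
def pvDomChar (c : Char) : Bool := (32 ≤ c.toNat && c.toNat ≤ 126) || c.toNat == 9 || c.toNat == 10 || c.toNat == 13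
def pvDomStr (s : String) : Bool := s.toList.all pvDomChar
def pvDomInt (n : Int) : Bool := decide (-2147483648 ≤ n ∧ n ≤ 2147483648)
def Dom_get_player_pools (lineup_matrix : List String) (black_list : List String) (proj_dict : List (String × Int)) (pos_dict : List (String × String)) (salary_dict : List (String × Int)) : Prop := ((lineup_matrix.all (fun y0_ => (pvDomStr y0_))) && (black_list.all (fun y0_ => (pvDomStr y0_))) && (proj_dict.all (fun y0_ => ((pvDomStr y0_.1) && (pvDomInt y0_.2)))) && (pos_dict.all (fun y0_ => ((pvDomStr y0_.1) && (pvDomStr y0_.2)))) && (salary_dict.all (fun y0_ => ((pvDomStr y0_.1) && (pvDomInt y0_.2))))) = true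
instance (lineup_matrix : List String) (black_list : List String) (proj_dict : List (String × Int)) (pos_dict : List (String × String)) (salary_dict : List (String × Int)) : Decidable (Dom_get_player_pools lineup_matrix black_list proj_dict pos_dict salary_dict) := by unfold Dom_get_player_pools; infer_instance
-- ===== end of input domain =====

-- B builds every slot pool in one distributing pass over the sorted players (blacklist filtered
-- during the pass) instead of A's per-slot rescans plus a mutating removal pass; same values proved.

-- ===== PORT A =====
-- '(pos in spot or spot in pos)' where pos may be None: Python raises TypeError there
-- (excluded by Pre_); on 'some pos' this is exactly the Python expression.
def pvOptIn (o : Option String) (spot : String) : Bool :=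
  match o with
  | some pos => PySem.Str.isIn pos spot || PySem.Str.isIn spot pos
  | none => false

-- 'pool.remove(player)' is guarded by 'player in pool', so it removes the first occurrence:
-- exactly List.erase (PySem.List.remove?_eq_some_erase).
def remove_ignored_players (player_pools : List (List String)) (black_list : List String) : List (List String) :=
  player_pools.map (fun pool =>
    black_list.foldl (fun pl py => if pl.contains py then pl.erase py else pl) pool)

def get_player_pools (lineup_matrix : List String) (black_list : List String) (proj_dict : List (String × Int)) (pos_dict : List (String × String)) (salary_dict : List (String × Int)) : List (List String) :=
  let pd := PySem.Dict.ofList proj_dict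
  let sorted_players := PySem.List.sorted pd.keys (fun p => pd.getD p 0) true
  let sorted_positions := sorted_players.map (fun p => (PySem.Dict.ofList pos_dict).get? p)
  let sorted_positions_dict := PySem.Dict.ofList (sorted_players.zip sorted_positions)
  let player_pools_with_ignored := lineup_matrix.map (fun spot =>
    sorted_positions_dict.keys.filter (fun player =>
      pvOptIn (sorted_positions_dict.getD player none) spot
        && (PySem.Dict.ofList salary_dict).contains player))
  remove_ignored_players player_pools_with_ignored black_list

-- ===== PORT B =====
def get_player_pools_alt (lineup_matrix : List String) (black_list : List String) (proj_dict : List (String × Int)) (pos_dict : List (String × String)) (salary_dict : List (String × Int)) : List (List String) :=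
  let pd := PySem.Dict.ofList proj_dict
  (PySem.List.sorted pd.keys (fun p => pd.getD p 0) true).foldl
    (fun pools player =>
      List.zipWith
        (fun spot pool =>
          if pvOptIn ((PySem.Dict.ofList pos_dict).get? player) spot
              && ((PySem.Dict.ofList salary_dict).contains player
                  && !(PySem.Set.contains (PySem.Set.ofList black_list) player)) then
            pool ++ [player]
          else pool)
        lineup_matrix pools)
    (lineup_matrix.map (fun _ => []))

-- ===== PRECONDITION & SPEC =====
-- Pre_ excludes exactly the inputs where Python A raises TypeError: a nonempty lineup_matrix
-- together with some projected player that has no entry in pos_dict ('None in spot').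
def Pre_get_player_pools (lineup_matrix : List String) (black_list : List String) (proj_dict : List (String × Int)) (pos_dict : List (String × String)) (salary_dict : List (String × Int)) : Prop :=
  lineup_matrix = [] ∨ ∀ p ∈ proj_dict, p.1 ∈ pos_dict.map Prod.fst
instance (lineup_matrix : List String) (black_list : List String) (proj_dict : List (String × Int)) (pos_dict : List (String × String)) (salary_dict : List (String × Int)) : Decidable (Pre_get_player_pools lineup_matrix black_list proj_dict pos_dict salary_dict) := by unfold Pre_get_player_pools; infer_instance

def pvWitness_get_player_pools : List String × List String × (List (String × Int)) × (List (String × String)) × (List (String × Int)) :=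
  (["QB", "FLEX"], ["b"], [("a", 7), ("b", 9)], [("a", "QB"), ("b", "RB")], [("a", 5000), ("b", 6000)])

def Spec_get_player_pools (lineup_matrix : List String) (black_list : List String) (proj_dict : List (String × Int)) (pos_dict : List (String × String)) (salary_dict : List (String × Int)) (out : List (List String)) : Prop := out = get_player_pools_alt lineup_matrix black_list proj_dict pos_dict salary_dict
instance (lineup_matrix : List String) (black_list : List String) (proj_dict : List (String × Int)) (pos_dict : List (String × String)) (salary_dict : List (String × Int)) (out : List (List String)) : Decidable (Spec_get_player_pools lineup_matrix black_list proj_dict pos_dict salary_dict out) := by unfold Spec_get_player_pools; infer_instance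

-- ===== CLAIM (what is proved, stated in full; the proofs are below) =====
def Claim_equal_get_player_pools : Prop := ∀ (lineup_matrix : List String) (black_list : List String) (proj_dict : List (String × Int)) (pos_dict : List (String × String)) (salary_dict : List (String × Int)), Dom_get_player_pools lineup_matrix black_list proj_dict pos_dict salary_dict → Pre_get_player_pools lineup_matrix black_list proj_dict pos_dict salary_dict → Spec_get_player_pools lineup_matrix black_list proj_dict pos_dict salary_dict (get_player_pools lineup_matrix black_list proj_dict pos_dict salary_dict)

-- ===== LEMMAS AND PROOFS =====

-- composing two zipWiths over the same left list
lemma pvZipZip (f g : String → List String → List String) :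
    ∀ (l : List String) (l' : List (List String)),
      List.zipWith f l (List.zipWith g l l') = List.zipWith (fun s p => f s (g s p)) l l'
  | [], _ => rfl
  | _ :: _, [] => rfl
  | s :: l, p :: l' => by simp [List.zipWith, pvZipZip f g l l']

-- zipWith against the all-empty initial pools is a map
lemma pvZipNil (h : String → List String) :
    ∀ l : List String,
      List.zipWith (fun s p => p ++ h s) l (l.map (fun _ => ([] : List String))) = l.map h
  | [] => rfl
  | s :: l => by
      simp only [List.map_cons, List.zipWith_cons_cons, List.nil_append, pvZipNil h l]

-- B's distributing fold computes, per slot, the filter of the player stream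
lemma pvFoldDistrib (q : String → String → Bool) :
    ∀ (ps : List String) (spots : List String) (pools : List (List String)),
      pools.length = spots.length →
      ps.foldl (fun pools pl =>
          List.zipWith (fun s p => if q pl s then p ++ [pl] else p) spots pools) pools
        = List.zipWith (fun s p => p ++ ps.filter (fun pl => q pl s)) spots pools := by
  intro ps
  induction ps with
  | nil =>
    intro spots pools hlen
    simp only [List.foldl_nil, List.filter_nil, List.append_nil]
    induction spots generalizing pools with
    | nil =>
      cases pools with
      | nil => rfl
      | cons _ _ => simp at hlen
    | cons s spots ihs =>
      cases pools with
      | nil => simp at hlen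
      | cons p pools =>
        simp only [List.zipWith_cons_cons]
        exact congrArg (p :: ·) (ihs pools (by simpa using hlen))
  | cons pl ps ih =>
    intro spots pools hlen
    simp only [List.foldl_cons]
    rw [ih _ _ (by simp [List.length_zipWith, hlen]), pvZipZip]
    have hfun : (fun s p => (if q pl s then p ++ [pl] else p) ++ List.filter (fun pl' => q pl' s) ps)
        = (fun s (p : List String) => p ++ List.filter (fun pl' => q pl' s) (pl :: ps)) := by
      funext s p
      by_cases h : q pl s = true <;> simp [h]
    rw [hfun]

-- A's guarded-remove pass over a duplicate-free pool is a filter by the blacklist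
lemma pvEraseFold :
    ∀ (bl pool : List String), pool.Nodup →
      bl.foldl (fun pl py => if pl.contains py then pl.erase py else pl) pool
        = pool.filter (fun x => !bl.contains x) := by
  intro bl
  induction bl with
  | nil => intro pool _; simp
  | cons py bl ih =>
    intro pool h
    have hstep : (if pool.contains py then pool.erase py else pool) = pool.erase py := by
      cases hc : pool.contains py with
      | true => simp
      | false => simp [List.erase_of_not_mem (by simpa using hc)]
    simp only [List.foldl_cons]
    rw [hstep, ih _ (h.erase py), List.Nodup.erase_eq_filter h py, List.filter_filter]
    refine List.filter_congr (fun x _ => ?_)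
    by_cases hx : x = py <;> by_cases hb : x ∈ bl <;> simp [hx, hb]

-- ===== VERDICT (by name: the statement is the Claim_ definition above) =====
theorem get_player_pools_spec : Claim_equal_get_player_pools := by
  intro lm bl proj pos sal _ _
  simp only [Spec_get_player_pools, get_player_pools, get_player_pools_alt,
    remove_ignored_players]
  set d := PySem.Dict.ofList proj with hd
  set players := PySem.List.sorted d.keys (fun p => d.getD p 0) true with hplayers
  have hnd : players.Nodup :=
    ((PySem.List.sorted_perm d.keys (fun p => d.getD p 0) true).nodup_iff).mpr
      (PySem.Dict.nodup_keys_ofList proj)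
  have hzip : players.zip (players.map (fun p => (PySem.Dict.ofList pos).get? p))
      = players.map (fun p => (p, (PySem.Dict.ofList pos).get? p)) := by
    have := @List.zip_map' String String (Option String) id
      (fun p => (PySem.Dict.ofList pos).get? p) players
    simpa using this
  have hitems : (PySem.Dict.ofList
        (players.map (fun p => (p, (PySem.Dict.ofList pos).get? p)))).items
      = players.map (fun p => (p, (PySem.Dict.ofList pos).get? p)) := by
    have h1 := PySem.Dict.items_foldl_insert_fresh players (fun p => p)
      (fun p => (PySem.Dict.ofList pos).get? p) PySem.Dict.empty
      (fun a _ => PySem.Dict.contains_empty a) (by simpa using hnd)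
    simp only [PySem.Dict.ofList, PySem.Dict.update, List.foldl_map]
    simpa using h1
  have hkeys : (PySem.Dict.ofList
        (players.map (fun p => (p, (PySem.Dict.ofList pos).get? p)))).keys = players := by
    simp only [PySem.Dict.keys, hitems, List.map_map]
    exact List.map_id' players
  have hget : ∀ p ∈ players,
      (PySem.Dict.ofList
        (players.map (fun p => (p, (PySem.Dict.ofList pos).get? p)))).getD p none
      = (PySem.Dict.ofList pos).get? p := by
    intro p hp
    refine PySem.Dict.getD_of_mem_items _ ?_ ?_ none
    · rw [hitems]; exact List.mem_map_of_mem hp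
    · rw [hkeys]; exact hnd
  rw [hzip, hkeys]
  rw [pvFoldDistrib
      (fun pl s => pvOptIn ((PySem.Dict.ofList pos).get? pl) s
        && ((PySem.Dict.ofList sal).contains pl
            && !(PySem.Set.contains (PySem.Set.ofList bl) pl)))
      players lm (lm.map (fun _ => [])) (by simp),
    pvZipNil, List.map_map]
  congr 1
  funext spot
  simp only [Function.comp]
  rw [List.filter_congr (fun p hp => by rw [hget p hp]),
    pvEraseFold bl _ (hnd.filter _), List.filter_filter]
  refine List.filter_congr (fun a _ => ?_)
  by_cases hb : a ∈ bl <;>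
    cases ho : pvOptIn ((PySem.Dict.ofList pos).get? a) spot <;>
      cases hs : (PySem.Dict.ofList sal).contains a <;>
        simp [hb, PySem.Set.contains, PySem.Set.mem_ofList]
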